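-- pv_equiv track=rewrite | github.com/sagidana/cai | src/cai/screen/modes.py | _motion_e
-- ===== SOURCE A (Python) =====
-- def _is_word_char(ch: str) -> bool:
--     """True for characters that belong to a vim 'word' (alnum + underscore)."""
--     return ch.isalnum() or ch == '_'
--
-- def _motion_e(plain: str, col: int) -> int:
--     """Return column after moving to end of word (vim `e`)."""
--     n = len(plain)
--     if col >= n - 1:
--         return max(0, n - 1)
--     col += 1
--     # Skip whitespace
--     while col < n and plain[col].isspace():
--         col += 1
--     if col >= n:
--         return max(0, n - 1)
--     # Move to end of word or punctuation group
--     if _is_word_char(plain[col]):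
--         while col + 1 < n and _is_word_char(plain[col + 1]):
--             col += 1
--     elif not plain[col].isspace():
--         while col + 1 < n and not plain[col + 1].isspace() and not _is_word_char(plain[col + 1]):
--             col += 1
--     return col
-- ===== SOURCE B (Python) =====
-- def _char_class(ch: str) -> str:
--     """Category token: 'w' word char (alnum/underscore), 's' whitespace, 'p' punctuation."""
--     if ch.isalnum() or ch == '_':
--         return 'w'
--     if ch.isspace():
--         return 's'
--     return 'p'
--
-- def _runs(plain: str) -> list:
--     """Run-length segmentation of the line: list of (cls, end) for each maximal
--     run of characters of equal class, in order; end is the run's last index."""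
--     runs = []
--     for i, ch in enumerate(plain):
--         c = _char_class(ch)
--         if runs and runs[-1][0] == c:
--             runs[-1] = (c, i)
--         else:
--             runs.append((c, i))
--     return runs
--
-- def _motion_e(plain: str, col: int) -> int:
--     """Return column after moving to end of word (vim `e`)."""
--     n = len(plain)
--     if col >= n - 1:
--         return max(0, n - 1)
--     # first non-whitespace run reaching past col: its last index is the answer
--     for c, end in _runs(plain):
--         if end >= col + 1 and c != 's':
--             return end
--     return n - 1
-- ===== Notes on version B (the rewrite author's own statement) =====
-- stated objective: alternative
-- what changed: B precomputes a run-length table of the whole line (maximal runs of equal character class) and answers by a single lookup — the end of the first non-whitespace run reaching past col — instead of A's cursor that walks forward skipping whitespace and then extends to the end of the word/punctuation group with two look-ahead loops.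
-- outside the precondition, e.g. on _motion_e(' a', -3): A returns -1, B returns 1; on _motion_e('', -2): A raises IndexError, B returns -1
import Mathlib
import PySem

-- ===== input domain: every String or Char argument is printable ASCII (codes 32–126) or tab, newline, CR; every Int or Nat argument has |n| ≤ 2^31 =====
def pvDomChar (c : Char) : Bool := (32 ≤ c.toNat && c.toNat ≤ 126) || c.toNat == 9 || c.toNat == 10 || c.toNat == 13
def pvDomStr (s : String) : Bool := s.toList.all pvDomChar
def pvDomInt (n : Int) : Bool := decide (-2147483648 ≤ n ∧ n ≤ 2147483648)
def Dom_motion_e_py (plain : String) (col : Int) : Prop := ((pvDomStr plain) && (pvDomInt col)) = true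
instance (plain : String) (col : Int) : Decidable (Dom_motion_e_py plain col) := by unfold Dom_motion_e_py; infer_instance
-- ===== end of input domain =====

-- B replaces A's forward-walking cursor (whitespace skip + two look-ahead loops) by a
-- precomputed run-length table of the line, answered by one lookup; alternative algorithm, same cost.

-- Python s[i] (possibly negative index, wraps); under Pre_ every index used is in range,
-- so the ' ' default of getD is never reached
def pvCh (cs : List Char) (i : Int) : Char := (PySem.List.pyGet? cs i).getD ' '

-- _is_word_char: ch.isalnum() or ch == '_'  (exact on the ASCII domain)
def pvIsWord (ch : Char) : Bool := ch.isAlphanum || ch == '_'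

-- ===== PORT A =====
-- while col < n and plain[col].isspace(): col += 1
def pvSkipWs (cs : List Char) (col : Int) : Int :=
  if h : col < (cs.length : Int) ∧ (pvCh cs col).isWhitespace then pvSkipWs cs (col + 1)
  else col
termination_by ((cs.length : Int) - col).toNat
decreasing_by omega

-- while col + 1 < n and _is_word_char(plain[col + 1]): col += 1
def pvWordEnd (cs : List Char) (col : Int) : Int :=
  if h : col + 1 < (cs.length : Int) ∧ pvIsWord (pvCh cs (col + 1)) then pvWordEnd cs (col + 1)
  else col
termination_by ((cs.length : Int) - col).toNat
decreasing_by omega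

-- while col + 1 < n and not plain[col + 1].isspace() and not _is_word_char(plain[col + 1]): col += 1
def pvPunctEnd (cs : List Char) (col : Int) : Int :=
  if h : col + 1 < (cs.length : Int) ∧ ¬(pvCh cs (col + 1)).isWhitespace ∧ ¬pvIsWord (pvCh cs (col + 1)) then
    pvPunctEnd cs (col + 1)
  else col
termination_by ((cs.length : Int) - col).toNat
decreasing_by omega

def motion_e_py (plain : String) (col : Int) : Int :=
  let cs := plain.toList
  let n : Int := cs.length
  if col ≥ n - 1 then max 0 (n - 1)
  else
    let col1 := pvSkipWs cs (col + 1)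
    if col1 ≥ n then max 0 (n - 1)
    else if pvIsWord (pvCh cs col1) then pvWordEnd cs col1
    else if !(pvCh cs col1).isWhitespace then pvPunctEnd cs col1
    else col1

-- ===== PORT B =====
-- _char_class: 'w' word char, 's' whitespace, 'p' punctuation
def pvCharClass (ch : Char) : Char :=
  if pvIsWord ch then 'w' else if ch.isWhitespace then 's' else 'p'

-- one iteration of _runs's loop; the run list is kept REVERSED (head = last run),
-- so Python's runs[-1] update is a head update and its append is a cons
def pvRunStep (runs : List (Char × Int)) (p : Int × Char) : List (Char × Int) :=
  let c := pvCharClass p.2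
  match runs with
  | r0 :: rest => if r0.1 == c then (c, p.1) :: rest else (c, p.1) :: r0 :: rest
  | [] => [(c, p.1)]

def pvRunsRev (cs : List Char) : List (Char × Int) :=
  (PySem.List.enumerate cs 0).foldl pvRunStep []

-- _runs(plain): list of (class, last index) of each maximal equal-class run, in order
def pvRuns (cs : List Char) : List (Char × Int) := (pvRunsRev cs).reverse

def motion_e_py_alt (plain : String) (col : Int) : Int :=
  let cs := plain.toList
  let n : Int := cs.length
  if col ≥ n - 1 then max 0 (n - 1)
  else
    -- for c, end in _runs(plain): if end >= col + 1 and c != 's': return end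
    match (pvRuns cs).find? (fun r => decide (col + 1 ≤ r.2) && r.1 != 's') with
    | some r => r.2
    | none => n - 1

-- ===== PRECONDITION & SPEC =====
-- Pre_ restricts to the natural domain of non-negative cursor columns: for negative col
-- A raises IndexError (col ≤ -len-2) or its value is an accident of Python's
-- negative-index wraparound (it can even return a negative column, e.g. -1 on (' a', -3)).
def Pre_motion_e_py (plain : String) (col : Int) : Prop := 0 ≤ col
instance (plain : String) (col : Int) : Decidable (Pre_motion_e_py plain col) := by
  unfold Pre_motion_e_py; infer_instance

def pvWitness_motion_e_py : String × Int := ("ab cd", 0)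

def Spec_motion_e_py (plain : String) (col : Int) (out : Int) : Prop := out = motion_e_py_alt plain col
instance (plain : String) (col : Int) (out : Int) : Decidable (Spec_motion_e_py plain col out) := by unfold Spec_motion_e_py; infer_instance

-- ===== CLAIM (what is proved, stated in full; the proofs are below) =====
def Claim_equal_motion_e_py : Prop := ∀ (plain : String) (col : Int), Dom_motion_e_py plain col → Pre_motion_e_py plain col → Spec_motion_e_py plain col (motion_e_py plain col)

-- ===== LEMMAS AND PROOFS =====

-- character class of position i (total; ' ' default never reached on in-range indices)
def pvGamma (cs : List Char) (i : Int) : Char := pvCharClass (pvCh cs i)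

-- "i is the last index of its run" (i = n-1, or the class changes after i)
def pvEndB (cs : List Char) (i : Int) : Bool :=
  (i == (cs.length : Int) - 1) || (pvGamma cs (i + 1) != pvGamma cs i)

-- "i is where vim `e` can land": last index of a non-whitespace run
def pvQual (cs : List Char) (i : Int) : Bool := pvEndB cs i && (pvGamma cs i != 's')

-- first landing index ≥ m, else n-1: the common reference value of both ports
def pvLeast (cs : List Char) (m : Int) : Int :=
  ((PySem.List.pyRange m (cs.length : Int) 1).find? (pvQual cs)).getD ((cs.length : Int) - 1)

lemma ws_not_word (ch : Char) (h : ch.isWhitespace = true) : pvIsWord ch = false := by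
  simp only [Char.isWhitespace, Bool.or_eq_true, decide_eq_true_eq] at h
  have h' : ch = ' ' ∨ ch = '\t' ∨ ch = '\x0d' ∨ ch = '\n' := by tauto
  rcases h' with h' | h' | h' | h' <;> subst h' <;> decide

lemma gamma_s_of_ws (cs : List Char) (i : Int) (h : (pvCh cs i).isWhitespace = true) :
    pvGamma cs i = 's' := by
  simp [pvGamma, pvCharClass, ws_not_word _ h, h]

lemma gamma_w_iff (cs : List Char) (i : Int) : pvGamma cs i = 'w' ↔ pvIsWord (pvCh cs i) = true := by
  simp only [pvGamma, pvCharClass]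
  split_ifs <;> simp_all

lemma gamma_p_of (cs : List Char) (i : Int) (hw : pvIsWord (pvCh cs i) = false)
    (hs : (pvCh cs i).isWhitespace = false) : pvGamma cs i = 'p' := by
  simp [pvGamma, pvCharClass, hw, hs]

-- A's whitespace-skip loop only walks over non-landing indices
lemma least_skip (cs : List Char) (m : Int) :
    pvLeast cs m = pvLeast cs (pvSkipWs cs m) := by
  fun_induction pvSkipWs cs m with
  | case1 m h ih =>
    have hq : pvQual cs m = false := by
      simp [pvQual, gamma_s_of_ws cs m h.2]
    rw [← ih]
    unfold pvLeast
    rw [PySem.List.pyRange_one_cons h.1]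
    simp [List.find?_cons, hq]
  | case2 m h => rfl

lemma skipWs_ge (cs : List Char) (m : Int) : m ≤ pvSkipWs cs m := by
  fun_induction pvSkipWs cs m with
  | case1 m h ih => omega
  | case2 m h => omega

lemma skipWs_nonspace (cs : List Char) (m : Int)
    (hlt : pvSkipWs cs m < (cs.length : Int)) :
    (pvCh cs (pvSkipWs cs m)).isWhitespace = false := by
  fun_induction pvSkipWs cs m with
  | case1 m h ih => exact ih hlt
  | case2 m h =>
    push Not at h
    simpa using h hlt

-- A's word look-ahead loop computes the first landing index from a word position
lemma wordEnd_eq_least (cs : List Char) (j : Int) (hlt : j < (cs.length : Int))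
    (hw : pvIsWord (pvCh cs j) = true) : pvWordEnd cs j = pvLeast cs j := by
  fun_induction pvWordEnd cs j with
  | case1 j h ih =>
    have hg : pvGamma cs j = 'w' := (gamma_w_iff cs j).2 hw
    have hg1 : pvGamma cs (j + 1) = 'w' := (gamma_w_iff cs (j + 1)).2 h.2
    have hq : pvQual cs j = false := by
      have hne : (j == (cs.length : Int) - 1) = false := by simp; omega
      simp [pvQual, pvEndB, hne, hg, hg1]
    rw [ih h.1 h.2]
    unfold pvLeast
    rw [PySem.List.pyRange_one_cons hlt]
    simp [List.find?_cons, hq]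
  | case2 j h =>
    push Not at h
    have hg : pvGamma cs j = 'w' := (gamma_w_iff cs j).2 hw
    have hq : pvQual cs j = true := by
      by_cases hl : j + 1 < (cs.length : Int)
      · have h2 : pvIsWord (pvCh cs (j + 1)) = false := by simpa using h hl
        have hg1 : pvGamma cs (j + 1) ≠ 'w' := by
          simp [gamma_w_iff, h2]
        simp [pvQual, pvEndB, hg]
        exact Or.inr hg1
      · have : (j == (cs.length : Int) - 1) = true := by simp; omega
        simp [pvQual, pvEndB, this, hg]
    unfold pvLeast
    rw [PySem.List.pyRange_one_cons hlt]
    simp [List.find?_cons, hq]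

-- A's punctuation look-ahead loop computes the first landing index from a punctuation position
lemma punctEnd_eq_least (cs : List Char) (j : Int) (hlt : j < (cs.length : Int))
    (hw : pvIsWord (pvCh cs j) = false) (hs : (pvCh cs j).isWhitespace = false) :
    pvPunctEnd cs j = pvLeast cs j := by
  fun_induction pvPunctEnd cs j with
  | case1 j h ih =>
    obtain ⟨h1, h2, h3⟩ := h
    have hg : pvGamma cs j = 'p' := gamma_p_of cs j hw hs
    have hg1 : pvGamma cs (j + 1) = 'p' :=
      gamma_p_of cs (j + 1) (by simpa using h3) (by simpa using h2)
    have hq : pvQual cs j = false := by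
      have hne : (j == (cs.length : Int) - 1) = false := by simp; omega
      simp [pvQual, pvEndB, hne, hg, hg1]
    rw [ih h1 (by simpa using h3) (by simpa using h2)]
    unfold pvLeast
    rw [PySem.List.pyRange_one_cons hlt]
    simp [List.find?_cons, hq]
  | case2 j h =>
    push Not at h
    have hg : pvGamma cs j = 'p' := gamma_p_of cs j hw hs
    have hq : pvQual cs j = true := by
      by_cases hl : j + 1 < (cs.length : Int)
      · have hg1 : pvGamma cs (j + 1) ≠ 'p' := by
          by_cases hws : (pvCh cs (j + 1)).isWhitespace = true
          · simp [gamma_s_of_ws cs (j + 1) hws]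
          · have hwd : pvIsWord (pvCh cs (j + 1)) = true := by
              by_contra hc
              exact absurd (h hl (by simpa using hws)) (by simp_all)
            simp [(gamma_w_iff cs (j + 1)).2 hwd]
        simp [pvQual, pvEndB, hg]
        exact Or.inr hg1
      · have : (j == (cs.length : Int) - 1) = true := by simp; omega
        simp [pvQual, pvEndB, this, hg]
    unfold pvLeast
    rw [PySem.List.pyRange_one_cons hlt]
    simp [List.find?_cons, hq]

-- pvCh on a one-element extension
lemma pvCh_append_lt (cs : List Char) (c : Char) (i : Int) (h0 : 0 ≤ i)
    (h : i < (cs.length : Int)) : pvCh (cs ++ [c]) i = pvCh cs i := by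
  obtain ⟨k, rfl⟩ : ∃ k : Nat, i = (k : Int) := ⟨i.toNat, by omega⟩
  have hk : k < cs.length := by exact_mod_cast h
  simp [pvCh, PySem.List.pyGet?_natCast, List.getElem?_append_left hk]

lemma pvCh_append_self (cs : List Char) (c : Char) :
    pvCh (cs ++ [c]) (cs.length : Int) = c := by
  simp [pvCh, PySem.List.pyGet?_natCast]

-- generic find? facts
lemma find?_congr_mem {α : Type} (l : List α) (p q : α → Bool)
    (h : ∀ a ∈ l, p a = q a) : l.find? p = l.find? q := by
  induction l with
  | nil => rfl
  | cons a l ih =>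
    simp only [List.find?_cons, h a (by simp)]
    cases q a <;> simp [ih (fun a ha => h a (by simp [ha]))]

-- run ends of the line: the run table is exactly the landing structure
def pvEnds (cs : List Char) : List Int :=
  (PySem.List.pyRange 0 (cs.length : Int) 1).filter (pvEndB cs)

lemma runsRev_char (cs : List Char) :
    pvRunsRev cs = ((pvEnds cs).map (fun i => (pvGamma cs i, i))).reverse := by
  induction cs using List.reverseRecOn with
  | nil => simp [pvRunsRev, pvEnds, PySem.List.enumerate_nil, PySem.List.pyRange_one_eq_nil]
  | append_singleton cs c ih =>
    have hstep : pvRunsRev (cs ++ [c]) = pvRunStep (pvRunsRev cs) ((cs.length : Int), c) := by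
      unfold pvRunsRev
      rw [PySem.List.enumerate_append]
      simp [PySem.List.enumerate_cons, PySem.List.enumerate_nil]
    have hlen : ((cs ++ [c]).length : Int) = (cs.length : Int) + 1 := by simp
    -- gamma agreement on the old indices
    have hgam : ∀ i : Int, 0 ≤ i → i < (cs.length : Int) →
        pvGamma (cs ++ [c]) i = pvGamma cs i := by
      intro i h0 h1; simp [pvGamma, pvCh_append_lt cs c i h0 h1]
    have hgamN : pvGamma (cs ++ [c]) (cs.length : Int) = pvCharClass c := by
      simp [pvGamma, pvCh_append_self]
    cases cs with
    | nil =>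
      have hc : pvCh [c] (0 : Int) = c := rfl
      have hr : PySem.List.pyRange 0 (1 : Int) 1 = [(0 : Int)] := by
        have h := PySem.List.pyRange_one_singleton (0 : Int)
        norm_num at h
        exact h
      have he : pvEndB [c] 0 = true := by simp [pvEndB]
      simp [hstep, pvRunStep, pvRunsRev, PySem.List.enumerate_nil, pvEnds, pvGamma, hr, he, hc]
    | cons d cs' =>
      set L : Int := ((d :: cs').length : Int) with hLdef
      have hL1 : 1 ≤ L := by rw [hLdef]; simp only [List.length_cons]; push_cast; omega
      have hsplitL : PySem.List.pyRange 0 L 1 = PySem.List.pyRange 0 (L - 1) 1 ++ [L - 1] := by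
        conv_lhs => rw [show L = (L - 1) + 1 by omega]
        rw [PySem.List.pyRange_one_succ_right (by omega)]
      -- old ends list ends with L-1
      have hend_last : pvEndB (d :: cs') (L - 1) = true := by
        simp only [pvEndB, ← hLdef]
        simp
      have hsplit_old : pvEnds (d :: cs') =
          ((PySem.List.pyRange 0 (L - 1) 1).filter (pvEndB (d :: cs'))) ++ [L - 1] := by
        unfold pvEnds
        rw [← hLdef, hsplitL]
        simp [List.filter_append, hend_last]
      -- endB agreement below L-1
      have hendB_lt : ∀ i : Int, 0 ≤ i → i < L - 1 →
          pvEndB ((d :: cs') ++ [c]) i = pvEndB (d :: cs') i := by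
        intro i h0 h1
        simp only [pvEndB, hlen, ← hLdef]
        rw [hgam i h0 (by omega), hgam (i + 1) (by omega) (by omega)]
        have e1 : (i == L + 1 - 1) = false := by simp; omega
        have e2 : (i == L - 1) = false := by simp; omega
        rw [e1, e2]
      have hendB_last : pvEndB ((d :: cs') ++ [c]) (L - 1)
          = (pvCharClass c != pvGamma (d :: cs') (L - 1)) := by
        simp only [pvEndB, hlen]
        rw [show L - 1 + 1 = L by omega]
        have e1 : (L - 1 == L + 1 - 1) = false := by
          simp only [beq_eq_false_iff_ne, ne_eq]; omega
        rw [e1, hgamN, hgam (L - 1) (by omega) (by omega)]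
        simp
      have hendB_N : pvEndB ((d :: cs') ++ [c]) L = true := by
        simp only [pvEndB, hlen]
        simp
      -- the new index range splits off its last element
      have hrange : PySem.List.pyRange 0 (((d :: cs') ++ [c]).length : Int) 1 =
          PySem.List.pyRange 0 L 1 ++ [L] := by
        rw [hlen, PySem.List.pyRange_one_succ_right (by omega)]
      -- new ends list
      have hnew : pvEnds ((d :: cs') ++ [c]) =
          ((PySem.List.pyRange 0 (L - 1) 1).filter (pvEndB (d :: cs'))) ++
            ((if (pvCharClass c != pvGamma (d :: cs') (L - 1)) = true then [L - 1] else []) ++ [L]) := by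
        unfold pvEnds
        rw [hrange, hsplitL]
        simp only [List.filter_append, List.append_assoc]
        congr 1
        · exact List.filter_congr (fun i hi => by
            have := PySem.List.mem_pyRange_one.1 hi
            exact hendB_lt i this.1 this.2)
        · simp only [List.filter_cons, List.filter_nil, hendB_last, hendB_N]
          split_ifs <;> simp_all
      -- map functions agree on old in-range indices
      have hmap_lt : ((PySem.List.pyRange 0 (L - 1) 1).filter (pvEndB (d :: cs'))).map
            (fun i => (pvGamma ((d :: cs') ++ [c]) i, i))
          = ((PySem.List.pyRange 0 (L - 1) 1).filter (pvEndB (d :: cs'))).map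
            (fun i => (pvGamma (d :: cs') i, i)) := by
        apply List.map_congr_left
        intro i hi
        have hm := PySem.List.mem_pyRange_one.1 (List.mem_of_mem_filter hi)
        rw [hgam i hm.1 (by omega)]
      rw [hstep, ih, hsplit_old, hnew]
      simp only [List.map_append, List.reverse_append, hmap_lt]
      by_cases hc : pvCharClass c = pvGamma (d :: cs') (L - 1)
      · have hb : (pvCharClass c != pvGamma (d :: cs') (L - 1)) = false := by simp [hc]
        simp [hb, pvRunStep, hc, hgamN, hgam (L - 1) (by omega) (by omega)]
        rw [← hc]
        simpa using hgamN.symm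
      · have hb : (pvCharClass c != pvGamma (d :: cs') (L - 1)) = true := by simp [hc]
        simp only [hb, if_true]
        simp [pvRunStep, hgamN, hgam (L - 1) (by omega) (by omega), Ne.symm hc, hc]
        exact ⟨by simpa using hgamN.symm,
          by simpa using (hgam (L - 1) (by omega) (by omega)).symm⟩

-- B's run-table lookup computes the first landing index ≥ m
lemma runs_find_eq_least (cs : List Char) (m : Int) (h0 : 0 ≤ m) :
    (match (pvRuns cs).find? (fun r => decide (m ≤ r.2) && r.1 != 's') with
     | some r => r.2
     | none => (cs.length : Int) - 1) = pvLeast cs m := by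
  have hchar : pvRuns cs = (pvEnds cs).map (fun i => (pvGamma cs i, i)) := by
    rw [pvRuns, runsRev_char, List.reverse_reverse]
  rw [hchar, List.find?_map]
  have hfilter : (pvEnds cs).find?
      ((fun r => decide (m ≤ r.2) && r.1 != 's') ∘ (fun i => (pvGamma cs i, i)))
      = (PySem.List.pyRange 0 (cs.length : Int) 1).find?
          (fun i => pvEndB cs i && (decide (m ≤ i) && (pvGamma cs i != 's'))) := by
    unfold pvEnds
    rw [List.find?_filter]
    apply find?_congr_mem
    intro i _
    simp only [Function.comp_apply, decide_eq_true_eq, Bool.decide_and, decide_eq_true,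
      bne, beq_iff_eq]
    cases h1 : pvEndB cs i <;> cases h2 : decide (m ≤ i) <;>
      cases h3 : pvGamma cs i == 's' <;> simp_all
  rw [hfilter]
  by_cases hm : m ≤ (cs.length : Int)
  · have hsplit : PySem.List.pyRange 0 (cs.length : Int) 1 =
        PySem.List.pyRange 0 m 1 ++ PySem.List.pyRange m (cs.length : Int) 1 :=
      PySem.List.pyRange_one_append 0 m (cs.length : Int) h0 hm
    rw [hsplit, List.find?_append]
    have hnone : (PySem.List.pyRange 0 m 1).find?
        (fun i => pvEndB cs i && (decide (m ≤ i) && (pvGamma cs i != 's'))) = none := by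
      rw [List.find?_eq_none]
      intro i hi
      have := PySem.List.mem_pyRange_one.1 hi
      simp [show ¬(m ≤ i) by omega]
    rw [hnone, Option.none_or]
    have hcongr : (PySem.List.pyRange m (cs.length : Int) 1).find?
        (fun i => pvEndB cs i && (decide (m ≤ i) && (pvGamma cs i != 's')))
        = (PySem.List.pyRange m (cs.length : Int) 1).find? (pvQual cs) := by
      apply find?_congr_mem
      intro i hi
      have := PySem.List.mem_pyRange_one.1 hi
      simp [pvQual, show m ≤ i from this.1]
    rw [hcongr]
    unfold pvLeast
    cases hfind : (PySem.List.pyRange m (cs.length : Int) 1).find? (pvQual cs) <;> simp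
  · have h1 : (PySem.List.pyRange 0 (cs.length : Int) 1).find?
        (fun i => pvEndB cs i && (decide (m ≤ i) && (pvGamma cs i != 's'))) = none := by
      rw [List.find?_eq_none]
      intro i hi
      have := PySem.List.mem_pyRange_one.1 hi
      simp [show ¬(m ≤ i) by omega]
    have h2 : PySem.List.pyRange m (cs.length : Int) 1 = [] :=
      PySem.List.pyRange_one_eq_nil (by omega)
    rw [h1]
    unfold pvLeast
    rw [h2]
    simp

-- ===== VERDICT (by name: the statements are the Claim_ definitions above) =====
theorem motion_e_py_spec : Claim_equal_motion_e_py := by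
  intro plain col _hDom hPre
  unfold Pre_motion_e_py at hPre
  simp only [Spec_motion_e_py, motion_e_py, motion_e_py_alt]
  set cs := plain.toList with hcs
  set n : Int := (cs.length : Int) with hn
  by_cases hg : col ≥ n - 1
  · rw [if_pos hg, if_pos hg]
  · rw [if_neg hg, if_neg hg]
    have hn2 : 2 ≤ n := by omega
    rw [runs_find_eq_least cs (col + 1) (by omega)]
    rw [least_skip cs (col + 1)]
    set j := pvSkipWs cs (col + 1) with hj
    have hjge : col + 1 ≤ j := skipWs_ge cs (col + 1)
    by_cases hge : j ≥ n
    · rw [if_pos hge]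
      unfold pvLeast
      rw [PySem.List.pyRange_one_eq_nil (by omega)]
      simp
      omega
    · rw [if_neg hge]
      have hns : (pvCh cs j).isWhitespace = false := skipWs_nonspace cs (col + 1) (by omega)
      by_cases hw : pvIsWord (pvCh cs j) = true
      · rw [if_pos hw]
        exact wordEnd_eq_least cs j (by omega) hw
      · simp only [Bool.not_eq_true] at hw
        rw [if_neg (by simp [hw]), if_pos (by simp [hns])]
        exact punctEnd_eq_least cs j (by omega) hw hns
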